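-- pv_equiv track=rewrite | github.com/wjianwei126/Algorithm-Practices-Python | Uber/validSudoku.py | isValidUnit
-- ===== SOURCE A (Python) =====
-- def isValidUnit(nums):
--     numSet = set()
--     for n in nums:
--         if n == '.':
--             continue
--         if n not in numSet:
--             numSet.add(n)
--         else:
--             return False
--     return True
-- ===== SOURCE B (Python) =====
-- def isValidUnit(nums):
--     # Set-free suffix scan: the unit is valid iff no non-'.' element
--     # reappears later in the list.
--     for i, head in enumerate(nums):
--         if head != '.' and head in nums[i + 1:]:
--             return False
--     return True
-- ===== Notes on version B (the rewrite author's own statement) =====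
-- stated objective: alternative
-- what changed: Replaces A's single pass with a growing set accumulator by a set-free suffix scan: for each non-'.' element, check whether it reappears in the rest of the list (O(n^2) membership scans, no set at all).
import Mathlib
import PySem

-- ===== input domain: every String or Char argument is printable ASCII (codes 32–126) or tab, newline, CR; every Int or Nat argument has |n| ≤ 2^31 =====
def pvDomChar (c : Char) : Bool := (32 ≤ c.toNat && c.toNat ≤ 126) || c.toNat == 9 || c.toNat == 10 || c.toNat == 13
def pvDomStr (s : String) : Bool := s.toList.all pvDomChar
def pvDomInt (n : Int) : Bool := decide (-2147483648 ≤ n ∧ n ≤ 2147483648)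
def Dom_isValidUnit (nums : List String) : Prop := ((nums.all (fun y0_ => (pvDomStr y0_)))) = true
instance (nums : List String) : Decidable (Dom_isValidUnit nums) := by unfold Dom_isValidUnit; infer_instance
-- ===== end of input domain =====

-- B replaces A's one-pass loop with a set accumulator (early return on a repeat)
-- by a set-free suffix scan: a unit is valid iff no non-'.' element reappears
-- later in the list. Objective: alternative (membership scans over the rest of
-- the list instead of a hash set; not faster).

-- ===== PORT A =====
-- A's loop: a set accumulator, early `return False` on a repeat.
def isValidUnitGo (numSet : PySem.Set String) : List String → Bool
  | [] => true
  | n :: rest =>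
    if n == "." then isValidUnitGo numSet rest
    else if !(PySem.Set.contains numSet n) then isValidUnitGo (PySem.Set.add numSet n) rest
    else false

def isValidUnit (nums : List String) : Bool := isValidUnitGo PySem.Set.empty nums

-- ===== PORT B =====
-- B: head/rest decomposition of the enumerate loop; `head in nums[i+1:]` is a
-- plain membership scan of the rest.
def isValidUnit_alt : List String → Bool
  | [] => true
  | head :: rest =>
    if head != "." && rest.contains head then false
    else isValidUnit_alt rest

-- ===== PRECONDITION & SPEC =====
def Spec_isValidUnit (nums : List String) (out : Bool) : Prop := out = isValidUnit_alt nums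
instance (nums : List String) (out : Bool) : Decidable (Spec_isValidUnit nums out) := by unfold Spec_isValidUnit; infer_instance

-- ===== CLAIM (what is proved, stated in full; the proofs are below) =====
def Claim_equal_isValidUnit : Prop := ∀ (nums : List String), Dom_isValidUnit nums → Spec_isValidUnit nums (isValidUnit nums)

-- ===== LEMMAS AND PROOFS =====

lemma isValidUnitGo_iff (xs : List String) : ∀ (s : List String),
    isValidUnitGo s xs = true ↔
      ((xs.filter (fun n => n != ".")).Nodup ∧
        ∀ x ∈ xs.filter (fun n => n != "."), x ∉ s) := by
  induction xs with
  | nil => simp [isValidUnitGo]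
  | cons x xs ih =>
    intro s
    by_cases hdot : x = "."
    · subst hdot
      simp [isValidUnitGo, ih]
    · have hb : (x == ".") = false := by simp [hdot]
      have hf : (x != ".") = true := by simp [hdot]
      by_cases hx : x ∈ s
      · have : isValidUnitGo s (x :: xs) = false := by
          simp [isValidUnitGo, hb, PySem.Set.contains, List.contains_eq_mem, hx]
        rw [this]
        simp only [List.filter_cons, hf, if_pos]
        constructor
        · intro h; cases h
        · rintro ⟨-, hall⟩
          exact absurd hx (hall x (by simp))
      · have : isValidUnitGo s (x :: xs) = isValidUnitGo (PySem.Set.add s x) xs := by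
          simp [isValidUnitGo, hb, PySem.Set.contains, List.contains_eq_mem, hx]
        rw [this, ih]
        have hadd : PySem.Set.add s x = s ++ [x] := by
          unfold PySem.Set.add
          simp [List.contains_eq_mem, hx]
        rw [hadd, show List.filter (fun n => n != ".") (x :: xs)
              = x :: List.filter (fun n => n != ".") xs from by
            simp [hf]]
        constructor
        · rintro ⟨hnd, hall⟩
          refine ⟨List.nodup_cons.mpr ⟨fun hm => (hall x hm) (by simp), hnd⟩, ?_⟩
          intro y hy
          rcases List.mem_cons.mp hy with rfl | hy'
          · exact hx
          · exact fun hys => hall y hy' (List.mem_append_left _ hys)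
        · rintro ⟨hnd, hall⟩
          obtain ⟨hxf, hnd'⟩ := List.nodup_cons.mp hnd
          refine ⟨hnd', ?_⟩
          intro y hy hys
          rcases List.mem_append.mp hys with h | h
          · exact hall y (List.mem_cons_of_mem _ hy) h
          · simp only [List.mem_singleton] at h
            exact hxf (h ▸ hy)

lemma alt_iff (nums : List String) :
    isValidUnit_alt nums = true ↔ (nums.filter (fun n => n != ".")).Nodup := by
  induction nums with
  | nil => simp [isValidUnit_alt]
  | cons x xs ih =>
    by_cases hdot : x = "."
    · subst hdot
      simp [isValidUnit_alt, ih]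
    · have hf : (x != ".") = true := by simp [hdot]
      have hfilt : List.filter (fun n => n != ".") (x :: xs)
          = x :: List.filter (fun n => n != ".") xs := by simp [hf]
      by_cases hx : x ∈ xs
      · have : isValidUnit_alt (x :: xs) = false := by
          simp [isValidUnit_alt, hf, List.contains_eq_mem, hx]
        rw [this, hfilt]
        simp only [List.nodup_cons, List.mem_filter, hf]
        constructor
        · intro h; cases h
        · rintro ⟨hmem, -⟩; exact absurd ⟨hx, trivial⟩ hmem
      · have : isValidUnit_alt (x :: xs) = isValidUnit_alt xs := by
          simp [isValidUnit_alt, hf, List.contains_eq_mem, hx]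
        rw [this, ih, hfilt]
        simp only [List.nodup_cons, List.mem_filter]
        constructor
        · intro h; exact ⟨fun ⟨hm, _⟩ => hx hm, h⟩
        · rintro ⟨-, h⟩; exact h

-- ===== VERDICT (by name: the statement is the Claim_ definition above) =====
theorem isValidUnit_spec : Claim_equal_isValidUnit := by
  intro nums _
  unfold Spec_isValidUnit isValidUnit
  rw [Bool.eq_iff_iff, isValidUnitGo_iff, alt_iff]
  simp [PySem.Set.empty]
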